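-- pv_equiv track=rewrite | github.com/ayushigupta-29/credit-chatbot | src/generate_kb_drivers.py | generate_doc
-- ===== SOURCE A (Python) =====
-- _DIRECTION_LABEL = {0: "Bad for score", 1: "Good for score", 2: "No effect"}
--
-- CATEGORY_HEADINGS = {
--     "dpd":         "Payment Delinquency (DPD / NPA / Write-off)",
--     "utilisation": "Credit Utilisation and Outstanding Balance",
--     "enquiries":   "Credit Enquiries",
--     "accounts":    "Account Counts",
-- }
--
-- def generate_doc(drivers: list) -> str:
--     lines = [
--         "# Credit Score Driver Reference",
--         "",
--         "This document lists every factor tracked in our bureau data that affects a credit score.",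
--         "For each factor, both directions of change are explicitly stated.",
--         "Do not infer or assume the opposite of any statement — both directions are written out here.",
--         "",
--         "---",
--         "",
--     ]
--
--     by_category = {}
--     for row in drivers:
--         driver_key, label, category, good_if_increase, good_if_decrease = row
--         by_category.setdefault(category, []).append(row)
--
--     for category, heading in CATEGORY_HEADINGS.items():
--         if category not in by_category:
--             continue
--         lines.append(f"## {heading}")
--         lines.append("")
--         for driver_key, label, _, good_if_increase, good_if_decrease in by_category[category]:
--             lines.append(f"### {label}")
--             inc_label = _DIRECTION_LABEL[good_if_increase]
--             dec_label = _DIRECTION_LABEL[good_if_decrease]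
--             lines.append(f"- **If this value increases:** {inc_label}")
--             lines.append(f"- **If this value decreases:** {dec_label}")
--             # Add plain-English explanation
--             lines.append(_plain_english(driver_key, good_if_increase, good_if_decrease))
--             lines.append("")
--
--     return "\n".join(lines)
--
-- def _plain_english(driver_key: str, good_if_increase: int, good_if_decrease: int) -> str:
--     """One-line plain-English explanation per driver."""
--     explanations = {
--         "has_dpd30_12m":     "- A DPD flag means at least one payment was 30+ days late in the last 12 months. Having this flag (value = 1) is bad. Clearing it (1 → 0) is good. Setting it (0 → 1) is bad.",
--         "has_dpd60_24m":     "- A DPD 60+ flag means at least one payment was 60+ days late in the last 24 months. Clearing it improves the score. Setting it lowers the score.",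
--         "has_dpd90_36m":     "- A DPD 90+ flag means at least one payment was 90+ days late in the last 36 months. Clearing it improves the score. Setting it lowers the score.",
--         "has_npa":           "- An NPA flag means at least one account has been classified as non-performing. Clearing it is good. Setting it is bad.",
--         "has_writeoff":      "- A write-off/settlement flag means a lender wrote off a debt or accepted a partial settlement. Clearing it improves the score. Setting it lowers the score.",
--         "cc_util_pct":       "- Credit utilisation is the % of available credit limit currently used. Lower is better (ideally under 30%). Higher utilisation signals financial stress. A decrease is good; an increase is bad.",
--         "enq_6m":            "- Each loan or card application triggers a hard enquiry. More enquiries in 6 months signals credit-seeking behaviour and lowers the score. Fewer enquiries is better.",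
--         "enq_12m":           "- Same as enquiries last 6 months but over a 12-month window. Fewer enquiries is better.",
--         "num_dpd30_12m":     "- The count of DPD 30+ incidents (not just whether one exists). More incidents means more missed payments — worse. Fewer incidents means payment behaviour is improving.",
--         "total_accounts":    "- More accounts (over time) shows experience managing different types of credit. An increase is generally positive. A sharp decrease means accounts were closed, which can hurt credit mix and age.",
--         "active_accounts":   "- More active accounts shows ongoing credit management. An increase is positive. A decrease has no standard effect — it could mean a loan was paid off (neutral-positive) or a card was closed (slightly negative).",
--         "total_outstanding": "- Total outstanding balance across all loans and cards. A decrease means debt is being paid down, which is positive. An increase means more debt, which can be negative.",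
--     }
--     return explanations.get(driver_key, "")
-- ===== SOURCE B (Python) =====
-- _DIRECTION_LABEL = {0: "Bad for score", 1: "Good for score", 2: "No effect"}
--
-- CATEGORY_HEADINGS = {
--     "dpd":         "Payment Delinquency (DPD / NPA / Write-off)",
--     "utilisation": "Credit Utilisation and Outstanding Balance",
--     "enquiries":   "Credit Enquiries",
--     "accounts":    "Account Counts",
-- }
--
--
-- def _plain_english(driver_key: str, good_if_increase: int, good_if_decrease: int) -> str:
--     """One-line plain-English explanation per driver."""
--     explanations = {
--         "has_dpd30_12m":     "- A DPD flag means at least one payment was 30+ days late in the last 12 months. Having this flag (value = 1) is bad. Clearing it (1 → 0) is good. Setting it (0 → 1) is bad.",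
--         "has_dpd60_24m":     "- A DPD 60+ flag means at least one payment was 60+ days late in the last 24 months. Clearing it improves the score. Setting it lowers the score.",
--         "has_dpd90_36m":     "- A DPD 90+ flag means at least one payment was 90+ days late in the last 36 months. Clearing it improves the score. Setting it lowers the score.",
--         "has_npa":           "- An NPA flag means at least one account has been classified as non-performing. Clearing it is good. Setting it is bad.",
--         "has_writeoff":      "- A write-off/settlement flag means a lender wrote off a debt or accepted a partial settlement. Clearing it improves the score. Setting it lowers the score.",
--         "cc_util_pct":       "- Credit utilisation is the % of available credit limit currently used. Lower is better (ideally under 30%). Higher utilisation signals financial stress. A decrease is good; an increase is bad.",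
--         "enq_6m":            "- Each loan or card application triggers a hard enquiry. More enquiries in 6 months signals credit-seeking behaviour and lowers the score. Fewer enquiries is better.",
--         "enq_12m":           "- Same as enquiries last 6 months but over a 12-month window. Fewer enquiries is better.",
--         "num_dpd30_12m":     "- The count of DPD 30+ incidents (not just whether one exists). More incidents means more missed payments — worse. Fewer incidents means payment behaviour is improving.",
--         "total_accounts":    "- More accounts (over time) shows experience managing different types of credit. An increase is generally positive. A sharp decrease means accounts were closed, which can hurt credit mix and age.",
--         "active_accounts":   "- More active accounts shows ongoing credit management. An increase is positive. A decrease has no standard effect — it could mean a loan was paid off (neutral-positive) or a card was closed (slightly negative).",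
--         "total_outstanding": "- Total outstanding balance across all loans and cards. A decrease means debt is being paid down, which is positive. An increase means more debt, which can be negative.",
--     }
--     return explanations.get(driver_key, "")
--
--
-- def generate_doc(drivers: list) -> str:
--     # No by_category index: for each heading (in CATEGORY_HEADINGS order) scan the
--     # drivers list in original order, building that body's body; emit the
--     # heading only if the body is non-empty.
--     out = [
--         "# Credit Score Driver Reference",
--         "",
--         "This document lists every factor tracked in our bureau data that affects a credit score.",
--         "For each factor, both directions of change are explicitly stated.",
--         "Do not infer or assume the opposite of any statement — both directions are written out here.",
--         "",
--         "---",
--         "",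
--     ]
--     for category, heading in CATEGORY_HEADINGS.items():
--         body = []
--         for driver_key, label, cat, good_if_increase, good_if_decrease in drivers:
--             if cat != category:
--                 continue
--             body.append(f"### {label}")
--             body.append(f"- **If this value increases:** {_DIRECTION_LABEL[good_if_increase]}")
--             body.append(f"- **If this value decreases:** {_DIRECTION_LABEL[good_if_decrease]}")
--             body.append(_plain_english(driver_key, good_if_increase, good_if_decrease))
--             body.append("")
--         if body:
--             out.append(f"## {heading}")
--             out.append("")
--             out.extend(body)
--     return "\n".join(out)
-- ===== Notes on version B (the rewrite author's own statement) =====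
-- stated objective: alternative
-- what changed: B removes A's by_category dict index entirely: for each of the four headings in order it rescans the drivers list, builds the section body, and emits the heading only when the body is non-empty.
import Mathlib
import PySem

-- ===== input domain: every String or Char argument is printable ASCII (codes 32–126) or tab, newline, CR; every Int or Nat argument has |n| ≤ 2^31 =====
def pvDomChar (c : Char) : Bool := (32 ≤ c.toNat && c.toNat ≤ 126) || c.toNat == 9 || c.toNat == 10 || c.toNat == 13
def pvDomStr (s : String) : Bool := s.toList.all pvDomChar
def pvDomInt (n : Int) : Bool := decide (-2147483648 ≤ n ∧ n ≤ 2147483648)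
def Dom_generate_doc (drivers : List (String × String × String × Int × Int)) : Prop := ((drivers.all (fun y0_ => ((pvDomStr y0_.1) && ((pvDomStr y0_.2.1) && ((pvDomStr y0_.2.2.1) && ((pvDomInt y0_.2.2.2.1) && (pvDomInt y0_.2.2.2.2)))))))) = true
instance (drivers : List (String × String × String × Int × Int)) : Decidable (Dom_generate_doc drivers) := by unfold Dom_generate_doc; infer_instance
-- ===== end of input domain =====

-- B drops A's by_category index: for each heading it rescans the drivers list and
-- emits the section only if non-empty (objective: alternative decomposition, same cost).

-- module-level helpers/constants shared by both Python files, ported once: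
-- _DIRECTION_LABEL[n]; exact for n ∈ {0,1,2} — Pre_generate_doc excludes the other
-- lookups, on which Python raises KeyError.
def pvDirectionLabel (n : Int) : String :=
  if n = 0 then "Bad for score" else if n = 1 then "Good for score" else "No effect"

-- _plain_english: explanations.get(driver_key, "")
def pvPlainEnglish (driver_key : String) : String :=
  (PySem.Dict.ofList
    [("has_dpd30_12m", "- A DPD flag means at least one payment was 30+ days late in the last 12 months. Having this flag (value = 1) is bad. Clearing it (1 → 0) is good. Setting it (0 → 1) is bad."),
     ("has_dpd60_24m", "- A DPD 60+ flag means at least one payment was 60+ days late in the last 24 months. Clearing it improves the score. Setting it lowers the score."),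
     ("has_dpd90_36m", "- A DPD 90+ flag means at least one payment was 90+ days late in the last 36 months. Clearing it improves the score. Setting it lowers the score."),
     ("has_npa", "- An NPA flag means at least one account has been classified as non-performing. Clearing it is good. Setting it is bad."),
     ("has_writeoff", "- A write-off/settlement flag means a lender wrote off a debt or accepted a partial settlement. Clearing it improves the score. Setting it lowers the score."),
     ("cc_util_pct", "- Credit utilisation is the % of available credit limit currently used. Lower is better (ideally under 30%). Higher utilisation signals financial stress. A decrease is good; an increase is bad."),
     ("enq_6m", "- Each loan or card application triggers a hard enquiry. More enquiries in 6 months signals credit-seeking behaviour and lowers the score. Fewer enquiries is better."),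
     ("enq_12m", "- Same as enquiries last 6 months but over a 12-month window. Fewer enquiries is better."),
     ("num_dpd30_12m", "- The count of DPD 30+ incidents (not just whether one exists). More incidents means more missed payments — worse. Fewer incidents means payment behaviour is improving."),
     ("total_accounts", "- More accounts (over time) shows experience managing different types of credit. An increase is generally positive. A sharp decrease means accounts were closed, which can hurt credit mix and age."),
     ("active_accounts", "- More active accounts shows ongoing credit management. An increase is positive. A decrease has no standard effect — it could mean a loan was paid off (neutral-positive) or a card was closed (slightly negative)."),
     ("total_outstanding", "- Total outstanding balance across all loans and cards. A decrease means debt is being paid down, which is positive. An increase means more debt, which can be negative.")]).getD driver_key ""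

-- CATEGORY_HEADINGS.items()
def pvCategoryHeadings : List (String × String) :=
  [("dpd", "Payment Delinquency (DPD / NPA / Write-off)"),
   ("utilisation", "Credit Utilisation and Outstanding Balance"),
   ("enquiries", "Credit Enquiries"),
   ("accounts", "Account Counts")]

-- the fixed header lines both Pythons start from
def pvHeader : List String :=
  ["# Credit Score Driver Reference",
   "",
   "This document lists every factor tracked in our bureau data that affects a credit score.",
   "For each factor, both directions of change are explicitly stated.",
   "Do not infer or assume the opposite of any statement — both directions are written out here.",
   "",
   "---",
   ""]

-- ===== PORT A =====
def generate_doc (drivers : List (String × String × String × Int × Int)) : String :=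
  let lines := pvHeader
  -- by_category.setdefault(category, []).append(row)  ≡  d[category] = d.get(category, []) + [row]
  let by_category : PySem.Dict String (List (String × String × String × Int × Int)) :=
    drivers.foldl (fun d row => d.modify row.2.2.1 [] (fun l => l ++ [row])) PySem.Dict.empty
  let lines := pvCategoryHeadings.foldl (fun lines ch =>
    if by_category.contains ch.1 = false then lines
    else
      let lines := lines ++ ["## " ++ ch.2] ++ [""]
      (by_category.getD ch.1 []).foldl (fun lines row =>
        lines ++ ["### " ++ row.2.1]
              ++ ["- **If this value increases:** " ++ pvDirectionLabel row.2.2.2.1]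
              ++ ["- **If this value decreases:** " ++ pvDirectionLabel row.2.2.2.2]
              ++ [pvPlainEnglish row.1]
              ++ [""]) lines) lines
  PySem.Str.join "\n" lines

-- ===== PORT B =====
def generate_doc_alt (drivers : List (String × String × String × Int × Int)) : String :=
  let out := pvCategoryHeadings.foldl (fun out ch =>
    let body := drivers.foldl (fun s row =>
      if row.2.2.1 ≠ ch.1 then s
      else s ++ ["### " ++ row.2.1,
                 "- **If this value increases:** " ++ pvDirectionLabel row.2.2.2.1,
                 "- **If this value decreases:** " ++ pvDirectionLabel row.2.2.2.2,
                 pvPlainEnglish row.1,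
                 ""]) []
    if body.isEmpty then out
    else out ++ ["## " ++ ch.2, ""] ++ body) pvHeader
  PySem.Str.join "\n" out

-- ===== PRECONDITION & SPEC =====
-- Pre_ excludes exactly the inputs on which Python A raises KeyError: a row whose
-- category is one of the four emitted ones but whose direction value is not a key
-- of _DIRECTION_LABEL (i.e. not 0, 1 or 2).
def Pre_generate_doc (drivers : List (String × String × String × Int × Int)) : Prop :=
  ∀ r ∈ drivers, r.2.2.1 ∈ (["dpd", "utilisation", "enquiries", "accounts"] : List String) →
    (r.2.2.2.1 = 0 ∨ r.2.2.2.1 = 1 ∨ r.2.2.2.1 = 2) ∧ (r.2.2.2.2 = 0 ∨ r.2.2.2.2 = 1 ∨ r.2.2.2.2 = 2)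
instance (drivers : List (String × String × String × Int × Int)) : Decidable (Pre_generate_doc drivers) := by unfold Pre_generate_doc; infer_instance

def pvWitness_generate_doc : (List (String × String × String × Int × Int)) :=
  [("has_npa", "NPA flag", "dpd", 0, 1)]

def Spec_generate_doc (drivers : List (String × String × String × Int × Int)) (out : String) : Prop := out = generate_doc_alt drivers
instance (drivers : List (String × String × String × Int × Int)) (out : String) : Decidable (Spec_generate_doc drivers out) := by unfold Spec_generate_doc; infer_instance

-- ===== CLAIM (what is proved, stated in full; the proofs are below) =====
def Claim_equal_generate_doc : Prop := ∀ (drivers : List (String × String × String × Int × Int)), Dom_generate_doc drivers → Pre_generate_doc drivers → Spec_generate_doc drivers (generate_doc drivers)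

-- ===== LEMMAS AND PROOFS =====

-- the five lines emitted per driver row
def pvEmit (row : String × String × String × Int × Int) : List String :=
  ["### " ++ row.2.1,
   "- **If this value increases:** " ++ pvDirectionLabel row.2.2.2.1,
   "- **If this value decreases:** " ++ pvDirectionLabel row.2.2.2.2,
   pvPlainEnglish row.1,
   ""]

-- A's by_category value at c is the order-preserving filter of drivers
theorem pv_byCategory_getD (drivers : List (String × String × String × Int × Int)) (c : String) :
    (drivers.foldl (fun d row => d.modify row.2.2.1 [] (fun l => l ++ [row]))
      (PySem.Dict.empty : PySem.Dict String (List (String × String × String × Int × Int)))).getD c []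
      = drivers.filter (fun r => r.2.2.1 == c) := by
  have h : drivers.foldl (fun d row => d.modify row.2.2.1 [] (fun l => l ++ [row]))
      (PySem.Dict.empty : PySem.Dict String (List (String × String × String × Int × Int)))
      = (drivers.map (fun r => (r.2.2.1, r))).foldl
          (fun d p => d.modify p.1 [] (fun l => l ++ [p.2])) PySem.Dict.empty := by
    rw [List.foldl_map]
  rw [h, PySem.Dict.getD_foldl_modify_append]
  simp [List.filter_map, Function.comp_def]

-- A's membership test agrees with "some row has this category"
theorem pv_byCategory_contains (drivers : List (String × String × String × Int × Int)) (c : String) :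
    (drivers.foldl (fun d row => d.modify row.2.2.1 [] (fun l => l ++ [row]))
      (PySem.Dict.empty : PySem.Dict String (List (String × String × String × Int × Int)))).contains c = true
      ↔ drivers.filter (fun r => r.2.2.1 == c) ≠ [] := by
  rw [PySem.Dict.contains_iff_mem_keys, PySem.Dict.keys_foldl_modify_key]
  rw [PySem.Set.mem_update]
  simp only [PySem.Dict.keys_empty, List.not_mem_nil, false_or, List.mem_map, ne_eq,
    List.filter_eq_nil_iff, not_forall]
  constructor
  · rintro ⟨r, h1, h2⟩; exact ⟨r, h1, by simp [h2]⟩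
  · rintro ⟨r, h1, h2⟩; exact ⟨r, h1, by simpa using h2⟩

-- B's conditional-append loop builds the filtered flatMap of the five-line blocks
theorem pv_foldl_body (drivers : List (String × String × String × Int × Int)) (c : String)
    (acc : List String) :
    drivers.foldl (fun s row =>
      if row.2.2.1 ≠ c then s
      else s ++ ["### " ++ row.2.1,
                 "- **If this value increases:** " ++ pvDirectionLabel row.2.2.2.1,
                 "- **If this value decreases:** " ++ pvDirectionLabel row.2.2.2.2,
                 pvPlainEnglish row.1,
                 ""]) acc
      = acc ++ (drivers.filter (fun r => r.2.2.1 == c)).flatMap pvEmit := by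
  induction drivers generalizing acc with
  | nil => simp
  | cons x xs ih =>
    rw [List.foldl_cons]
    by_cases h : x.2.2.1 = c
    · rw [if_neg (by simp [h]), ih]
      simp [h, pvEmit]
    · rw [if_pos (by simp [h]), ih]
      simp [h]

-- A's unconditional emit loop over a list
theorem pv_foldl_emit (l : List (String × String × String × Int × Int)) (acc : List String) :
    l.foldl (fun lines row =>
        lines ++ ["### " ++ row.2.1]
              ++ ["- **If this value increases:** " ++ pvDirectionLabel row.2.2.2.1]
              ++ ["- **If this value decreases:** " ++ pvDirectionLabel row.2.2.2.2]
              ++ [pvPlainEnglish row.1]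
              ++ [""]) acc
      = acc ++ l.flatMap pvEmit := by
  induction l generalizing acc with
  | nil => simp
  | cons x xs ih => rw [List.foldl_cons, ih]; simp [pvEmit]

-- ===== VERDICT (by name: the statement is the Claim_ definition above) =====
theorem generate_doc_spec : Claim_equal_generate_doc := by
  intro drivers _ _
  unfold Spec_generate_doc generate_doc generate_doc_alt
  apply congrArg (PySem.Str.join "\n")
  apply PySem.List.foldl_congr_mem
  intro lines ch _
  rw [pv_foldl_body drivers ch.1 []]
  by_cases h : drivers.filter (fun r => r.2.2.1 == ch.1) = []
  · have hc : (drivers.foldl (fun d row => d.modify row.2.2.1 [] (fun l => l ++ [row]))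
        (PySem.Dict.empty : PySem.Dict String (List (String × String × String × Int × Int)))).contains ch.1 = false := by
      rcases Bool.eq_false_or_eq_true ((drivers.foldl (fun d row => d.modify row.2.2.1 [] (fun l => l ++ [row]))
        (PySem.Dict.empty : PySem.Dict String (List (String × String × String × Int × Int)))).contains ch.1) with h' | h'
      · exact absurd h ((pv_byCategory_contains drivers ch.1).mp h')
      · exact h'
    simp [hc, h]
  · have hc := (pv_byCategory_contains drivers ch.1).mpr h
    have hne : ((drivers.filter (fun r => r.2.2.1 == ch.1)).flatMap pvEmit) ≠ [] := by
      obtain ⟨r, hr⟩ := List.exists_mem_of_ne_nil _ h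
      intro hnil
      rw [List.flatMap_eq_nil_iff] at hnil
      exact absurd (hnil _ hr) (by simp [pvEmit])
    rw [pv_byCategory_getD, pv_foldl_emit, hc]
    simp [hne, List.append_assoc]
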